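-- pv_equiv track=rewrite | github.com/makasprzak/aoc | day_16/fft.py | signle_cycle_fft
-- ===== SOURCE A (Python) =====
-- def signle_cycle_fft(sum_cache, i, int_signal, window_length):
--     positives = 0
--     negatives = 0
--     for f in range(0, len(int_signal), window_length):
--         sum1 = sum(int_signal[f:f + int(window_length / 4)])
--         positives += sum1
--         negatives += sum(int_signal[f+int(window_length/2):f+int(3*window_length/4)])
--     fft = abs(positives - negatives) % 10
--     return fft
-- ===== SOURCE B (Python) =====
-- def signle_cycle_fft(sum_cache, i, int_signal, window_length):
--     # One pass over the signal: classify each element by its index's residue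
--     # modulo the window length instead of slicing out each window.
--     if window_length < 0:
--         return 0  # no window starts fit below the signal
--     q1 = window_length // 4
--     q2 = window_length // 2
--     q3 = (3 * window_length) // 4
--     positives = 0
--     negatives = 0
--     for j, v in enumerate(int_signal):
--         r = j % window_length
--         if r < q1:
--             positives += v
--         elif q2 <= r < q3:
--             negatives += v
--     return abs(positives - negatives) % 10
-- ===== Notes on version B (the rewrite author's own statement) =====
-- stated objective: alternative
-- what changed: Replaces A's window loop with two slice-sums per window by a single pass over the signal that classifies each element by its index's residue modulo the window length (quarter boundaries precomputed once with integer floor division); Pre_ excludes window_length = 0, on which A raises ValueError (range step 0).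
import Mathlib
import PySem

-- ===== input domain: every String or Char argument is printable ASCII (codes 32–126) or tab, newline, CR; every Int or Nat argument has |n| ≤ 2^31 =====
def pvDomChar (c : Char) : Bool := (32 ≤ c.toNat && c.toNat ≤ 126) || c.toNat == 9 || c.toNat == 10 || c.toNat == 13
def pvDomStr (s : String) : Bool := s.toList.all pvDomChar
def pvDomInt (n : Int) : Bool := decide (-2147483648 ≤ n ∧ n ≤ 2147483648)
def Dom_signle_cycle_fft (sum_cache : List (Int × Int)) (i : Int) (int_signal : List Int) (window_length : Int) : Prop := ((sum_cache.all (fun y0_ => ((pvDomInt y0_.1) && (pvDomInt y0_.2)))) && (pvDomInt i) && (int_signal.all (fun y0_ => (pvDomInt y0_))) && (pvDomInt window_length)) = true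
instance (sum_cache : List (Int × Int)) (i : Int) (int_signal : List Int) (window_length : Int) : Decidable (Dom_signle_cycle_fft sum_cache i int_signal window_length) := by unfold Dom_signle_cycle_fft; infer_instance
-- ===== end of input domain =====

-- B replaces A's per-window slice sums by a single pass that classifies each element
-- by its index's residue modulo the window length; same O(n) cost, different traversal.

-- ===== PORT A =====
-- int(window_length / 4), int(window_length / 2), int(3 * window_length / 4) are float division
-- followed by int() truncation; exact as PySem.Int.truncdiv on the domain |window_length| ≤ 2^31 < 2^53.
def signle_cycle_fft (sum_cache : List (Int × Int)) (i : Int) (int_signal : List Int) (window_length : Int) : Int :=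
  let st := (PySem.List.pyRange 0 (int_signal.length : Int) window_length).foldl
    (fun (pn : Int × Int) f =>
      let sum1 := (PySem.List.slice int_signal (some f) (some (f + PySem.Int.truncdiv window_length 4))).sum
      (pn.1 + sum1,
       pn.2 + (PySem.List.slice int_signal
                 (some (f + PySem.Int.truncdiv window_length 2))
                 (some (f + PySem.Int.truncdiv (3 * window_length) 4))).sum))
    (0, 0)
  PySem.Int.mod |st.1 - st.2| 10

-- ===== PORT B =====
def signle_cycle_fft_alt (sum_cache : List (Int × Int)) (i : Int) (int_signal : List Int) (window_length : Int) : Int :=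
  if window_length < 0 then 0
  else
    let q1 := PySem.Int.floordiv window_length 4
    let q2 := PySem.Int.floordiv window_length 2
    let q3 := PySem.Int.floordiv (3 * window_length) 4
    let st := (PySem.List.enumerate int_signal).foldl
      (fun (pn : Int × Int) jv =>
        let r := PySem.Int.mod jv.1 window_length
        if r < q1 then (pn.1 + jv.2, pn.2)
        else if q2 ≤ r ∧ r < q3 then (pn.1, pn.2 + jv.2)
        else pn)
      (0, 0)
    PySem.Int.mod |st.1 - st.2| 10

-- ===== PRECONDITION & SPEC =====
-- Pre_ excludes exactly window_length = 0, on which A raises ValueError (range() arg 3 must not be zero).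
def Pre_signle_cycle_fft (sum_cache : List (Int × Int)) (i : Int) (int_signal : List Int) (window_length : Int) : Prop := window_length ≠ 0
instance (sum_cache : List (Int × Int)) (i : Int) (int_signal : List Int) (window_length : Int) : Decidable (Pre_signle_cycle_fft sum_cache i int_signal window_length) := by unfold Pre_signle_cycle_fft; infer_instance
def pvWitness_signle_cycle_fft : (List (Int × Int)) × Int × List Int × Int := ([], 0, [1, 2, 3, 4, 5, 6, 7, 8], 4)

def Spec_signle_cycle_fft (sum_cache : List (Int × Int)) (i : Int) (int_signal : List Int) (window_length : Int) (out : Int) : Prop := out = signle_cycle_fft_alt sum_cache i int_signal window_length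
instance (sum_cache : List (Int × Int)) (i : Int) (int_signal : List Int) (window_length : Int) (out : Int) : Decidable (Spec_signle_cycle_fft sum_cache i int_signal window_length out) := by unfold Spec_signle_cycle_fft; infer_instance

-- ===== CLAIM (what is proved, stated in full; the proofs are below) =====
def Claim_equal_signle_cycle_fft : Prop := ∀ (sum_cache : List (Int × Int)) (i : Int) (int_signal : List Int) (window_length : Int), Dom_signle_cycle_fft sum_cache i int_signal window_length → Pre_signle_cycle_fft sum_cache i int_signal window_length → Spec_signle_cycle_fft sum_cache i int_signal window_length (signle_cycle_fft sum_cache i int_signal window_length)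

-- ===== LEMMAS AND PROOFS =====

-- a foldl that adds independent contributions to each pair component is a pair of map-sums
theorem pvFoldPair {β : Type} (l : List β) (f g : β → Int) (p : Int × Int) :
    l.foldl (fun s x => (s.1 + f x, s.2 + g x)) p = (p.1 + (l.map f).sum, p.2 + (l.map g).sum) := by
  induction l generalizing p with
  | nil => simp
  | cons x t ih => simp [ih, add_assoc]

theorem pvRange_pos_nil (a b s : Int) (hs : 0 < s) (hab : b ≤ a) :
    PySem.List.pyRange a b s = [] := by
  simp [PySem.List.pyRange, hs.ne', hs, not_lt.mpr hab]

theorem pvRange_pos_cons (a b s : Int) (hs : 0 < s) (hab : a < b) :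
    PySem.List.pyRange a b s = a :: PySem.List.pyRange (a + s) b s := by
  rw [PySem.List.pyRange_of_pos _ _ hs, PySem.List.pyRange_of_pos _ _ hs]
  by_cases h2 : a + s < b
  · have hd : (b - a + s - 1) / s = (b - (a + s) + s - 1) / s + 1 := by
      have h := Int.add_mul_ediv_right (b - (a + s) + s - 1) 1 hs.ne'
      have he : b - a + s - 1 = (b - (a + s) + s - 1) + 1 * s := by ring
      rw [he, h]
    have hn : ((b - a + s - 1) / s).toNat = ((b - (a + s) + s - 1) / s).toNat + 1 := by
      have h0 : 0 ≤ (b - (a + s) + s - 1) / s := Int.ediv_nonneg (by omega) (by omega)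
      omega
    simp only [if_pos hab, if_pos h2, hn, List.range_succ_eq_map, List.map_cons, List.map_map]
    congr 1
    · simp
    · apply List.map_congr_left; intro k _
      simp [Function.comp, Nat.succ_eq_add_one]; push_cast; ring
  · have h1 : ((b - a + s - 1) / s) = 1 := by
      have hle : 1 ≤ (b - a + s - 1) / s := by
        rw [Int.le_ediv_iff_mul_le hs]; omega
      have hlt : (b - a + s - 1) / s < 2 := by
        rw [Int.ediv_lt_iff_lt_mul hs]; omega
      omega
    simp [if_pos hab, if_neg h2, h1]

theorem pvRange_pos_shift (a b c s : Int) (hs : 0 < s) :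
    PySem.List.pyRange (a + c) (b + c) s = (PySem.List.pyRange a b s).map (· + c) := by
  rw [PySem.List.pyRange_of_pos _ _ hs, PySem.List.pyRange_of_pos _ _ hs]
  have h : b + c - (a + c) = b - a := by ring
  simp only [h, add_lt_add_iff_right, List.map_map]
  apply List.map_congr_left; intro k _; simp; ring

-- enumerate with a shifted start is a shifted enumerate
theorem pvEnumShift {α : Type} (l : List α) (s c : Int) :
    PySem.List.enumerate l (s + c) = (PySem.List.enumerate l s).map (fun jv => (jv.1 + c, jv.2)) := by
  induction l generalizing s with
  | nil => simp [PySem.List.enumerate]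
  | cons x t ih =>
    simp only [PySem.List.enumerate, List.map_cons]
    rw [show s + c + 1 = (s + 1) + c by ring, ih (s + 1)]

-- sum of the elements whose index lies in [a, b) equals the clamped drop/take sum
theorem pvBandSum (l : List Int) (a b : Int) :
    ((PySem.List.enumerate l 0).map (fun jv => if a ≤ jv.1 ∧ jv.1 < b then jv.2 else 0)).sum
      = ((l.drop a.toNat).take (b.toNat - a.toNat)).sum := by
  induction l generalizing a b with
  | nil => simp
  | cons x t ih =>
    have hsh : PySem.List.enumerate t 1 = (PySem.List.enumerate t 0).map (fun jv => (jv.1 + 1, jv.2)) := by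
      simpa using pvEnumShift t 0 1
    simp only [PySem.List.enumerate, List.map_cons, List.sum_cons]
    rw [show (0:Int) + 1 = 1 by norm_num, hsh, List.map_map]
    have hr : ((PySem.List.enumerate t 0).map
        ((fun jv => if a ≤ jv.1 ∧ jv.1 < b then jv.2 else 0) ∘ (fun jv => (jv.1 + 1, jv.2)))).sum
        = ((t.drop (a - 1).toNat).take ((b - 1).toNat - (a - 1).toNat)).sum := by
      rw [← ih (a - 1) (b - 1)]
      apply congrArg; apply List.map_congr_left; intro jv _
      simp only [Function.comp]
      have hiff : (a ≤ jv.1 + 1 ∧ jv.1 + 1 < b) ↔ (a - 1 ≤ jv.1 ∧ jv.1 < b - 1) := by omega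
      simp [hiff]
    by_cases h1 : a ≤ 0
    · by_cases h2 : 0 < b
      · have ha0 : a.toNat = 0 := by omega
        have ha1 : (a - 1).toNat = 0 := by omega
        have hb1 : (b - 1).toNat = b.toNat - 1 := by omega
        have hbn : b.toNat - a.toNat = (b.toNat - 1) + 1 := by omega
        rw [if_pos (show a ≤ 0 ∧ (0:Int) < b from ⟨h1, h2⟩), hr, hb1, ha1, ha0]
        simp only [Nat.sub_zero, List.drop_zero]
        obtain ⟨m, hm⟩ : ∃ m, b.toNat = m + 1 := ⟨b.toNat - 1, by omega⟩
        rw [hm]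
        simp [List.take_succ_cons]
      · have hno : ¬ (a ≤ 0 ∧ (0:Int) < b) := by omega
        rw [if_neg hno, hr]
        have hb0 : b.toNat = 0 := by omega
        have hb1 : (b - 1).toNat = 0 := by omega
        simp [hb0, hb1]
    · have hno : ¬ (a ≤ 0 ∧ (0:Int) < b) := by omega
      rw [if_neg hno, hr]
      have h' : (b - 1).toNat - (a - 1).toNat = b.toNat - a.toNat := by omega
      have ha : a.toNat = (a - 1).toNat + 1 := by omega
      rw [h', ha, List.drop_succ_cons]
      simp

theorem pvSliceShift (l : List Int) (x y w : Int) (hx : 0 ≤ x) (hy : 0 ≤ y) (hw : 0 ≤ w) :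
    PySem.List.slice l (some (x + w)) (some (y + w)) = PySem.List.slice (l.drop w.toNat) (some x) (some y) := by
  rw [PySem.List.slice_toNat _ (by omega) (by omega), PySem.List.slice_toNat _ hx hy]
  have e1 : (y + w).toNat - (x + w).toNat = y.toNat - x.toNat := by omega
  have e2 : (x + w).toNat = x.toNat + w.toNat := by omega
  rw [e1, e2, List.drop_drop, Nat.add_comm w.toNat x.toNat]

-- the workhorse: band [a, b) of every window, summed window by window, equals one
-- residue-classified pass over the enumerated list
theorem pvWindowed (w a b : Int) (hw : 0 < w) (ha : 0 ≤ a) (hb0 : 0 ≤ b) (hb : b ≤ w) :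
    ∀ l : List Int,
      ((PySem.List.pyRange 0 (l.length : Int) w).map
          (fun f => (PySem.List.slice l (some (f + a)) (some (f + b))).sum)).sum
        = ((PySem.List.enumerate l 0).map
            (fun jv => if a ≤ PySem.Int.mod jv.1 w ∧ PySem.Int.mod jv.1 w < b then jv.2 else 0)).sum := by
  suffices H : ∀ (N : Nat) (l : List Int), l.length ≤ N →
      ((PySem.List.pyRange 0 (l.length : Int) w).map
          (fun f => (PySem.List.slice l (some (f + a)) (some (f + b))).sum)).sum
        = ((PySem.List.enumerate l 0).map
            (fun jv => if a ≤ PySem.Int.mod jv.1 w ∧ PySem.Int.mod jv.1 w < b then jv.2 else 0)).sum by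
    exact fun l => H l.length l le_rfl
  intro N
  induction N with
  | zero =>
    intro l hl
    have : l = [] := List.length_eq_zero_iff.mp (Nat.le_zero.mp hl)
    subst this
    simp [pvRange_pos_nil 0 0 w hw le_rfl, PySem.List.enumerate]
  | succ N ihN =>
    intro l hl
    rcases l with _ | ⟨x, rest⟩
    · simp [pvRange_pos_nil 0 0 w hw le_rfl, PySem.List.enumerate]
    · -- nonempty list
      set l := x :: rest with hldef
      have hn : (0:Int) < (l.length : Int) := by
        have h0 : 0 < l.length := by simp [hldef]
        exact_mod_cast h0
      have hWw : ((w.toNat : Int)) = w := Int.toNat_of_nonneg hw.le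
      set W := w.toNat with hWdef
      set d := l.drop W with hddef
      set t := l.take W with htdef
      have hdlen : d.length = l.length - W := by simp [hddef]
      have hdle : d.length ≤ N := by
        have hW1 : 1 ≤ W := by omega
        have hll : l.length = rest.length + 1 := by simp [hldef]
        omega
      -- LHS decomposition
      have hcons := pvRange_pos_cons 0 (l.length : Int) w hw hn
      have hshift : PySem.List.pyRange w (l.length : Int) w
          = (PySem.List.pyRange 0 ((l.length : Int) - w) w).map (· + w) := by
        have h := pvRange_pos_shift 0 ((l.length : Int) - w) w w hw
        rw [show ((l.length : Int) - w) + w = (l.length : Int) by ring, zero_add] at h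
        exact h
      have hR' : PySem.List.pyRange 0 ((l.length : Int) - w) w
          = PySem.List.pyRange 0 ((d.length : Int)) w := by
        by_cases hnw : w ≤ (l.length : Int)
        · congr 1
          simp [hdlen]
          omega
        · rw [pvRange_pos_nil _ _ _ hw (by omega), pvRange_pos_nil _ _ _ hw (by
            have : d.length = 0 := by simp [hdlen]; omega
            simp [this])]
      have hLHS : ((PySem.List.pyRange 0 (l.length : Int) w).map
            (fun f => (PySem.List.slice l (some (f + a)) (some (f + b))).sum)).sum
          = (PySem.List.slice l (some a) (some b)).sum
            + ((PySem.List.pyRange 0 ((d.length : Int)) w).map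
                (fun f => (PySem.List.slice d (some (f + a)) (some (f + b))).sum)).sum := by
        rw [hcons]
        simp only [List.map_cons, List.sum_cons, zero_add]
        congr 1
        rw [hshift, hR', List.map_map]
        apply congrArg
        apply List.map_congr_left
        intro f hf
        have hf0 : 0 ≤ f := by
          rcases (PySem.List.mem_pyRange_iff_of_pos hw f).mp hf with ⟨h1, _, _⟩
          exact h1
        simp only [Function.comp]
        rw [show f + w + a = (f + a) + w by ring, show f + w + b = (f + b) + w by ring,
          pvSliceShift l (f + a) (f + b) w (by omega) (by omega) hw.le]
      -- RHS decomposition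
      have hsplit : l = t ++ d := (List.take_append_drop W l).symm
      have hp1 : ((PySem.List.enumerate t 0).map
            (fun jv => if a ≤ PySem.Int.mod jv.1 w ∧ PySem.Int.mod jv.1 w < b then jv.2 else 0)).sum
          = (PySem.List.slice l (some a) (some b)).sum := by
        have hcongr : ((PySem.List.enumerate t 0).map
              (fun jv => if a ≤ PySem.Int.mod jv.1 w ∧ PySem.Int.mod jv.1 w < b then jv.2 else 0)).sum
            = ((PySem.List.enumerate t 0).map
              (fun jv => if a ≤ jv.1 ∧ jv.1 < b then jv.2 else 0)).sum := by
          apply congrArg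
          apply List.map_congr_left
          intro jv hjv
          rcases (PySem.List.mem_enumerate_iff _ _ _).mp hjv with ⟨k, hk, rfl⟩
          have htle : t.length ≤ W := by
            rw [htdef]; exact List.length_take_le _ _
          have hklt : (k : Int) < w := by omega
          have hmod : PySem.Int.mod ((0:Int) + (k : Int)) w = (0:Int) + (k : Int) := by
            rw [PySem.Int.mod_eq_emod_of_pos hw]
            exact Int.emod_eq_of_lt (by omega) (by omega)
          rw [hmod]
        rw [hcongr, pvBandSum t a b, PySem.List.slice_toNat l ha hb0]
        have hmm : min (b.toNat - a.toNat) (W - a.toNat) = b.toNat - a.toNat := by omega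
        rw [htdef, List.drop_take, List.take_take, hmm]
      have hp2 : ((PySem.List.enumerate d ((t.length : Int))).map
            (fun jv => if a ≤ PySem.Int.mod jv.1 w ∧ PySem.Int.mod jv.1 w < b then jv.2 else 0)).sum
          = ((PySem.List.enumerate d 0).map
            (fun jv => if a ≤ PySem.Int.mod jv.1 w ∧ PySem.Int.mod jv.1 w < b then jv.2 else 0)).sum := by
        by_cases hd : d = []
        · simp [hd, PySem.List.enumerate]
        · have hlw : W ≤ l.length := by
            by_contra hc
            exact hd (by simp [hddef]; omega)
          have ht : (t.length : Int) = w := by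
            simp [htdef]
            omega
          rw [ht]
          have hsh : PySem.List.enumerate d w = (PySem.List.enumerate d 0).map (fun jv => (jv.1 + w, jv.2)) := by
            simpa using pvEnumShift d 0 w
          rw [hsh, List.map_map]
          apply congrArg
          apply List.map_congr_left
          intro jv _
          simp only [Function.comp]
          have hm : PySem.Int.mod (jv.1 + w) w = PySem.Int.mod jv.1 w := by
            rw [PySem.Int.mod_eq_emod_of_pos hw, PySem.Int.mod_eq_emod_of_pos hw]
            simp
          rw [hm]
      have hRHS : ((PySem.List.enumerate l 0).map
            (fun jv => if a ≤ PySem.Int.mod jv.1 w ∧ PySem.Int.mod jv.1 w < b then jv.2 else 0)).sum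
          = (PySem.List.slice l (some a) (some b)).sum
            + ((PySem.List.enumerate d 0).map
              (fun jv => if a ≤ PySem.Int.mod jv.1 w ∧ PySem.Int.mod jv.1 w < b then jv.2 else 0)).sum := by
        conv_lhs => rw [hsplit]
        rw [PySem.List.enumerate_append, List.map_append, List.sum_append, hp1]
        rw [show (0 : Int) + (t.length : Int) = (t.length : Int) by ring, hp2]
      rw [hLHS, hRHS, ihN d hdle]

-- ===== VERDICT (by name: the statement is the Claim_ definition above) =====
theorem signle_cycle_fft_spec : Claim_equal_signle_cycle_fft := by
  intro sum_cache i int_signal w _hdom hpre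
  unfold Spec_signle_cycle_fft
  have hwne : w ≠ 0 := hpre
  by_cases hwneg : w < 0
  · -- negative step: A's range is empty, B returns 0 by its guard
    have h1 : ¬ (0 < w) := by omega
    have h2 : ¬ ((int_signal.length : Int) < 0) := by
      simp
    simp [signle_cycle_fft, signle_cycle_fft_alt, PySem.List.pyRange, hwne, h1, h2, hwneg,
      PySem.Int.mod]
  · have hw : 0 < w := by omega
    -- the three quarter boundaries, as euclidean divisions
    have ht1 : PySem.Int.truncdiv w 4 = PySem.Int.floordiv w 4 := by
      show w.tdiv 4 = PySem.Int.floordiv w 4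
      rw [Int.tdiv_eq_ediv_of_nonneg hw.le, PySem.Int.floordiv_eq_ediv_of_pos (by norm_num)]
    have ht2 : PySem.Int.truncdiv w 2 = PySem.Int.floordiv w 2 := by
      show w.tdiv 2 = PySem.Int.floordiv w 2
      rw [Int.tdiv_eq_ediv_of_nonneg hw.le, PySem.Int.floordiv_eq_ediv_of_pos (by norm_num)]
    have ht3 : PySem.Int.truncdiv (3 * w) 4 = PySem.Int.floordiv (3 * w) 4 := by
      show (3 * w).tdiv 4 = PySem.Int.floordiv (3 * w) 4
      rw [Int.tdiv_eq_ediv_of_nonneg (by omega), PySem.Int.floordiv_eq_ediv_of_pos (by norm_num)]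
    set q1 := PySem.Int.floordiv w 4 with hq1def
    set q2 := PySem.Int.floordiv w 2 with hq2def
    set q3 := PySem.Int.floordiv (3 * w) 4 with hq3def
    have hq1e : q1 = w / 4 := by rw [hq1def, PySem.Int.floordiv_eq_ediv_of_pos (by norm_num)]
    have hq2e : q2 = w / 2 := by rw [hq2def, PySem.Int.floordiv_eq_ediv_of_pos (by norm_num)]
    have hq3e : q3 = (3 * w) / 4 := by rw [hq3def, PySem.Int.floordiv_eq_ediv_of_pos (by norm_num)]
    have hq10 : 0 ≤ q1 := by rw [hq1e]; omega
    have hq1w : q1 ≤ w := by rw [hq1e]; omega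
    have hq20 : 0 ≤ q2 := by rw [hq2e]; omega
    have hq30 : 0 ≤ q3 := by rw [hq3e]; omega
    have hq3w : q3 ≤ w := by rw [hq3e]; omega
    have hq12 : q1 ≤ q2 := by rw [hq1e, hq2e]; omega
    have hmodnn : ∀ j : Int, 0 ≤ PySem.Int.mod j w := by
      intro j
      rw [PySem.Int.mod_eq_emod_of_pos hw]
      exact Int.emod_nonneg j hw.ne'
    -- A's fold as a pair of window-band sums
    have hA : signle_cycle_fft sum_cache i int_signal w
        = PySem.Int.mod
            |((PySem.List.pyRange 0 (int_signal.length : Int) w).map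
                (fun f => (PySem.List.slice int_signal (some f) (some (f + q1))).sum)).sum
              - ((PySem.List.pyRange 0 (int_signal.length : Int) w).map
                (fun f => (PySem.List.slice int_signal (some (f + q2)) (some (f + q3))).sum)).sum| 10 := by
      unfold signle_cycle_fft
      rw [pvFoldPair (PySem.List.pyRange 0 (int_signal.length : Int) w)
        (fun f => (PySem.List.slice int_signal (some f) (some (f + PySem.Int.truncdiv w 4))).sum)
        (fun f => (PySem.List.slice int_signal (some (f + PySem.Int.truncdiv w 2))
          (some (f + PySem.Int.truncdiv (3 * w) 4))).sum) (0, 0)]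
      simp only [ht1, ht2, ht3, zero_add]
    -- B's fold as a pair of residue-band sums
    have hfun : (fun (pn : Int × Int) (jv : Int × Int) =>
          let r := PySem.Int.mod jv.1 w
          if r < q1 then (pn.1 + jv.2, pn.2)
          else if q2 ≤ r ∧ r < q3 then (pn.1, pn.2 + jv.2)
          else pn)
        = (fun (pn : Int × Int) (jv : Int × Int) =>
            (pn.1 + (if PySem.Int.mod jv.1 w < q1 then jv.2 else 0),
             pn.2 + (if q2 ≤ PySem.Int.mod jv.1 w ∧ PySem.Int.mod jv.1 w < q3 then jv.2 else 0))) := by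
      funext pn jv
      by_cases hc1 : PySem.Int.mod jv.1 w < q1
      · have hc2 : ¬ (q2 ≤ PySem.Int.mod jv.1 w ∧ PySem.Int.mod jv.1 w < q3) := by omega
        simp [hc1, hc2]
      · by_cases hc2 : q2 ≤ PySem.Int.mod jv.1 w ∧ PySem.Int.mod jv.1 w < q3
        · simp [hc1, hc2]
        · simp [hc1, hc2]
    have hB : signle_cycle_fft_alt sum_cache i int_signal w
        = PySem.Int.mod
            |((PySem.List.enumerate int_signal 0).map
                (fun jv => if PySem.Int.mod jv.1 w < q1 then jv.2 else 0)).sum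
              - ((PySem.List.enumerate int_signal 0).map
                (fun jv => if q2 ≤ PySem.Int.mod jv.1 w ∧ PySem.Int.mod jv.1 w < q3 then jv.2 else 0)).sum| 10 := by
      unfold signle_cycle_fft_alt
      rw [if_neg hwneg]
      simp only [← hq1def, ← hq2def, ← hq3def]
      rw [hfun, pvFoldPair (PySem.List.enumerate int_signal 0)
        (fun jv => if PySem.Int.mod jv.1 w < q1 then jv.2 else 0)
        (fun jv => if q2 ≤ PySem.Int.mod jv.1 w ∧ PySem.Int.mod jv.1 w < q3 then jv.2 else 0) (0, 0)]
      simp only [zero_add]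
    rw [hA, hB]
    -- positives band [0, q1)
    have hpos := pvWindowed w 0 q1 hw le_rfl hq10 hq1w int_signal
    simp only [add_zero] at hpos
    have hpos' : ((PySem.List.enumerate int_signal 0).map
          (fun jv => if 0 ≤ PySem.Int.mod jv.1 w ∧ PySem.Int.mod jv.1 w < q1 then jv.2 else 0)).sum
        = ((PySem.List.enumerate int_signal 0).map
          (fun jv => if PySem.Int.mod jv.1 w < q1 then jv.2 else 0)).sum := by
      apply congrArg
      apply List.map_congr_left
      intro jv _
      have := hmodnn jv.1
      simp [this]
    -- negatives band [q2, q3)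
    have hneg := pvWindowed w q2 q3 hw hq20 hq30 hq3w int_signal
    rw [hpos, hpos', hneg]
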